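-- pv_equiv track=rewrite | github.com/awellisz/BS-Poker | main.py | fullesthouse
-- ===== SOURCE A (Python) =====
-- from collections import Counter
-- import itertools
--
-- def contains_all(a, b):
--     """
--     Utility function
--     Check if array A contains all elements of B, including with repeated values.
--     E.g. containsall([11, 4, 6], [4, 4]) -> False
--     E.g. containsall([11, 4, 6], [6, 11]) -> True
--     """
--     counter_a = Counter(a)
--     counter_b = Counter(b)
--     return all(v <= counter_a[k] for k, v in counter_b.items())
--
-- def remove_match(hand, match):
--     """
--     Utility function
--     Remove the list 'match' from the list 'hand'
--     E.g. remove_match([3, 6, 8, 1, 1], [1, 6]) -> [3, 8, 1]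
--     (actually returns a Counter object instead of a list but example is just for clarity,
--     the returned object effectively functions as a list in the hand-checking functions below)
--     """
--     new_hand = Counter(hand)
--     new_hand.subtract(Counter(match))
--     return new_hand
--
-- def fourok(hand, c):
--     """
--     Return true if there is a four of a kind of the given card
--     """
--     # All possible fours of a kind
--     # Probably some way to automate this but it's simple enough to hardcode
--     matches = [[c, c, c, c], [c, c, c, 2], [c, c, 2, 2], [c, 2, 2, 2], [2, 2, 2, 2]]
--
--     for match in matches:
--         if contains_all(hand, match):
--             return True
--     return False
--
-- def fullesthouse(hand, c):
--     """
--     Return true if fullest house of the card (five of a kind + four of a kind of any other)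
--     """
--     if (len(hand) < 9):
--         return False
--
--     fiveok_matches = [[c, c, c, c, 2], [c, c, c, 2, 2], [c, c, 2, 2, 2], [c, 2, 2, 2, 2]]
--     for match in fiveok_matches:
--         if contains_all(hand, match):
--             new_hand = remove_match(hand, match)
--             for i in itertools.chain(range(2, c), range(c + 1, 15)):
--                 if fourok(new_hand, i):
--                     return True
--     return False
-- ===== SOURCE B (Python) =====
-- from collections import Counter
--
-- def fullesthouse(hand, c):
--     """
--     True iff fullest house of card c: five of a kind of c (always needs at least
--     one wild 2, since A has no all-natural five pattern) plus four of a kind of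
--     some other rank in range(2, c) u range(c+1, 15), using one Counter and a
--     closed-form wild-count feasibility test instead of nested pattern loops.
--     """
--     if len(hand) < 9:
--         return False
--     cnt = Counter(hand)
--     w = cnt[2]
--     if c == 2:
--         # every five-of-c pattern collapses to five 2s
--         if w < 5:
--             return False
--         rem = w - 5
--     else:
--         nc = cnt[c]
--         if nc == 0 or w == 0 or nc + w < 5:
--             return False
--         # use as few wilds as possible for the five of a kind
--         rem = w - max(1, 5 - nc)
--     if rem >= 4:
--         # four wilds alone make a four of a kind of any eligible rank
--         return True
--     return any(r != 2 and (2 <= r < c or c < r <= 14) and n + rem >= 4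
--                for r, n in cnt.items())
-- ===== Notes on version B (the rewrite author's own statement) =====
-- stated objective: simpler
-- what changed: Replaces A's enumeration of four five-of-a-kind wild patterns, a Counter subtraction per pattern and a nested scan over ranks 2..14 each re-running five four-of-a-kind pattern checks with one Counter, a closed-form feasibility test on the wild count (five-of-c possible iff nc>=1, w>=1 and nc+w>=5, spending max(1,5-nc) wilds), and a single pass over the counter items.
import Mathlib
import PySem

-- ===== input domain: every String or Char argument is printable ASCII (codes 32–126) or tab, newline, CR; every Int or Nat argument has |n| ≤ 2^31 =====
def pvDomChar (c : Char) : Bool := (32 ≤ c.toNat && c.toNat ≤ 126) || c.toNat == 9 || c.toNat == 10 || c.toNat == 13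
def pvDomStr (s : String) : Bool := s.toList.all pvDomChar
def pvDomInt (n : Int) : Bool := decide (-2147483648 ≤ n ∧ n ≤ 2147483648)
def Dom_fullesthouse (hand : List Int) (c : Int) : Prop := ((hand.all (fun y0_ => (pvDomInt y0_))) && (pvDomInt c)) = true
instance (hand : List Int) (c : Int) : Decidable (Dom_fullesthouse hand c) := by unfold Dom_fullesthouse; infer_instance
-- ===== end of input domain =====

-- B replaces A's nested pattern/rank enumeration by one Counter, a closed-form wild-count
-- feasibility test and a single scan of the counter items (objective: simpler).

-- ===== PORT A =====
-- Counter(a) vs Counter(b): all(v <= counter_a[k] for k, v in counter_b.items())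
def contains_all (a b : List Int) : Bool :=
  (PySem.Dict.counter b).items.all (fun kv => kv.2 ≤ (PySem.Dict.counter a).getD kv.1 0)

-- contains_all when its first argument already is a Counter (Counter(Counter) copies counts)
def contains_allC (d : PySem.Dict Int Int) (b : List Int) : Bool :=
  (PySem.Dict.counter b).items.all (fun kv => kv.2 ≤ d.getD kv.1 0)

-- new_hand = Counter(hand); new_hand.subtract(Counter(match))
def remove_match (hand matc : List Int) : PySem.Dict Int Int :=
  (PySem.Dict.counter matc).items.foldl
    (fun d kv => d.insert kv.1 (d.getD kv.1 0 - kv.2)) (PySem.Dict.counter hand)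

def fourok (h : PySem.Dict Int Int) (c : Int) : Bool :=
  ([[c,c,c,c],[c,c,c,2],[c,c,2,2],[c,2,2,2],[2,2,2,2]] : List (List Int)).any
    (fun m => contains_allC h m)

def fullesthouse (hand : List Int) (c : Int) : Bool :=
  if hand.length < 9 then false
  else
    ([[c,c,c,c,2],[c,c,c,2,2],[c,c,2,2,2],[c,2,2,2,2]] : List (List Int)).any
      (fun m =>
        contains_all hand m &&
        (PySem.List.pyRange 2 c 1 ++ PySem.List.pyRange (c+1) 15 1).any
          (fun i => fourok (remove_match hand m) i))

-- ===== PORT B =====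
-- rem >= 4 or some eligible rank of the counter completes a four of a kind
def rankOk (cnt : PySem.Dict Int Int) (c rem : Int) : Bool :=
  (4 ≤ rem : Bool) ||
  cnt.items.any (fun rn =>
    decide (rn.1 ≠ 2 ∧ ((2 ≤ rn.1 ∧ rn.1 < c) ∨ (c < rn.1 ∧ rn.1 ≤ 14)) ∧ 4 ≤ rn.2 + rem))

def fullesthouse_alt (hand : List Int) (c : Int) : Bool :=
  if hand.length < 9 then false
  else
    let cnt := PySem.Dict.counter hand
    let w := cnt.getD 2 0
    if c = 2 then
      -- every five-of-c pattern collapses to five 2s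
      if w < 5 then false
      else rankOk cnt c (w - 5)
    else
      let nc := cnt.getD c 0
      if nc = 0 ∨ w = 0 ∨ nc + w < 5 then false
      else rankOk cnt c (w - max 1 (5 - nc))

-- ===== PRECONDITION & SPEC =====
def Spec_fullesthouse (hand : List Int) (c : Int) (out : Bool) : Prop := out = fullesthouse_alt hand c
instance (hand : List Int) (c : Int) (out : Bool) : Decidable (Spec_fullesthouse hand c out) := by unfold Spec_fullesthouse; infer_instance

-- ===== CLAIM (what is proved, stated in full; the proofs are below) =====
def Claim_equal_fullesthouse : Prop := ∀ (hand : List Int) (c : Int), Dom_fullesthouse hand c → Spec_fullesthouse hand c (fullesthouse hand c)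

-- ===== LEMMAS AND PROOFS =====

lemma contains_allC_iff (d : PySem.Dict Int Int) (b : List Int) :
    contains_allC d b = true ↔ ∀ k ∈ b, (b.count k : Int) ≤ d.getD k 0 := by
  unfold contains_allC
  simp [PySem.Dict.items_counter, List.all_eq_true, PySem.Set.mem_ofList]

lemma contains_all_iff (a b : List Int) :
    contains_all a b = true ↔ ∀ k ∈ b, (b.count k : Int) ≤ (a.count k : Int) := by
  unfold contains_all
  simp [PySem.Dict.items_counter, List.all_eq_true, PySem.Set.mem_ofList,
    PySem.Dict.getD_counter]

lemma foldl_insert_sub_getD (L : List Int) (f : Int → Int) (d : PySem.Dict Int Int)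
    (hL : L.Nodup) (i : Int) :
    (L.foldl (fun d k => d.insert k (d.getD k 0 - f k)) d).getD i 0 =
      if i ∈ L then d.getD i 0 - f i else d.getD i 0 := by
  induction L generalizing d with
  | nil => simp
  | cons a t ih =>
    have ha : a ∉ t := (List.nodup_cons.mp hL).1
    have ht : t.Nodup := (List.nodup_cons.mp hL).2
    simp only [List.foldl_cons]
    rw [ih _ ht]
    by_cases hit : i ∈ t
    · have hia : i ≠ a := fun h => ha (h ▸ hit)
      simp [hit, hia, PySem.Dict.getD_insert]
    · by_cases hia : i = a
      · subst hia
        simp [hit, PySem.Dict.getD_insert]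
      · simp [hit, hia, PySem.Dict.getD_insert]

lemma getD_remove_match (hand m : List Int) (i : Int) :
    (remove_match hand m).getD i 0 = (hand.count i : Int) - (m.count i : Int) := by
  unfold remove_match
  rw [PySem.Dict.items_counter, List.foldl_map,
    foldl_insert_sub_getD _ _ _ (PySem.Set.nodup_ofList m) i]
  by_cases him : i ∈ m
  · simp [PySem.Set.mem_ofList, him, PySem.Dict.getD_counter]
  · simp [PySem.Set.mem_ofList, him, PySem.Dict.getD_counter,
      List.count_eq_zero_of_not_mem him]

lemma fourok_iff (d : PySem.Dict Int Int) (i : Int) (hi : i ≠ 2) :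
    fourok d i = true ↔
      (4 ≤ d.getD i 0 ∨ (3 ≤ d.getD i 0 ∧ 1 ≤ d.getD 2 0) ∨
       (2 ≤ d.getD i 0 ∧ 2 ≤ d.getD 2 0) ∨ (1 ≤ d.getD i 0 ∧ 3 ≤ d.getD 2 0) ∨
       4 ≤ d.getD 2 0) := by
  simp only [fourok, List.any_cons, List.any_nil, Bool.or_eq_true, contains_allC_iff,
    Bool.false_eq_true, or_false]
  constructor
  · rintro (h | h | h | h | h)
    · have hI := h i (by simp)
      simp [hi, Ne.symm hi, List.count_cons] at hI
      omega
    · have hI := h i (by simp)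
      have h2 := h 2 (by simp)
      simp [hi, Ne.symm hi, List.count_cons] at hI h2
      omega
    · have hI := h i (by simp)
      have h2 := h 2 (by simp)
      simp [hi, Ne.symm hi, List.count_cons] at hI h2
      omega
    · have hI := h i (by simp)
      have h2 := h 2 (by simp)
      simp [hi, Ne.symm hi, List.count_cons] at hI h2
      omega
    · have h2 := h 2 (by simp)
      simp [List.count_cons] at h2
      omega
  · rintro (h | ⟨h1, h2⟩ | ⟨h1, h2⟩ | ⟨h1, h2⟩ | h)
    · refine Or.inl fun k hk => ?_
      simp only [List.mem_cons, List.not_mem_nil, or_false] at hk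
      rcases hk with rfl | rfl | rfl | rfl <;> (simp [hi, Ne.symm hi, List.count_cons] <;> omega)
    · refine Or.inr (Or.inl fun k hk => ?_)
      simp only [List.mem_cons, List.not_mem_nil, or_false] at hk
      rcases hk with rfl | rfl | rfl | rfl <;> (simp [hi, Ne.symm hi, List.count_cons] <;> omega)
    · refine Or.inr (Or.inr (Or.inl fun k hk => ?_))
      simp only [List.mem_cons, List.not_mem_nil, or_false] at hk
      rcases hk with rfl | rfl | rfl | rfl <;> (simp [hi, Ne.symm hi, List.count_cons] <;> omega)
    · refine Or.inr (Or.inr (Or.inr (Or.inl fun k hk => ?_)))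
      simp only [List.mem_cons, List.not_mem_nil, or_false] at hk
      rcases hk with rfl | rfl | rfl | rfl <;> (simp [hi, Ne.symm hi, List.count_cons] <;> omega)
    · refine Or.inr (Or.inr (Or.inr (Or.inr fun k hk => ?_)))
      simp only [List.mem_cons, List.not_mem_nil, or_false] at hk
      rcases hk with rfl | rfl | rfl | rfl <;> (simp [List.count_cons] <;> omega)

lemma fourok2_iff (d : PySem.Dict Int Int) :
    fourok d 2 = true ↔ 4 ≤ d.getD 2 0 := by
  simp only [fourok, List.any_cons, List.any_nil, Bool.or_eq_true, contains_allC_iff,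
    Bool.false_eq_true, or_false]
  constructor
  · rintro (h | h | h | h | h) <;> simpa using h 2 (by simp)
  · intro h
    refine Or.inl fun k hk => ?_
    simp only [List.mem_cons, List.not_mem_nil, or_false] at hk
    rcases hk with rfl | rfl | rfl | rfl <;> simpa using h

lemma rankOk_iff (hand : List Int) (c rem : Int) :
    rankOk (PySem.Dict.counter hand) c rem = true ↔
      4 ≤ rem ∨ ∃ k ∈ hand, k ≠ 2 ∧ ((2 ≤ k ∧ k < c) ∨ (c < k ∧ k ≤ 14)) ∧
        4 ≤ (hand.count k : Int) + rem := by
  unfold rankOk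
  simp [PySem.Dict.items_counter, List.any_eq_true, PySem.Set.mem_ofList, and_assoc]

lemma mem_range_iff (c i : Int) :
    i ∈ PySem.List.pyRange 2 c 1 ++ PySem.List.pyRange (c+1) 15 1 ↔
      (2 ≤ i ∧ i < c) ∨ (c < i ∧ i ≤ 14) := by
  simp only [List.mem_append, PySem.List.mem_pyRange_one]
  omega

lemma A_char (hand : List Int) (c : Int) (h9 : ¬ hand.length < 9) :
    fullesthouse hand c = true ↔
      ∃ m ∈ ([[c,c,c,c,2],[c,c,c,2,2],[c,c,2,2,2],[c,2,2,2,2]] : List (List Int)),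
        contains_all hand m = true ∧
        ∃ i, ((2 ≤ i ∧ i < c) ∨ (c < i ∧ i ≤ 14)) ∧ fourok (remove_match hand m) i = true := by
  unfold fullesthouse
  rw [if_neg h9]
  simp only [List.any_eq_true, Bool.and_eq_true]
  constructor
  · rintro ⟨m, hm, hca, i, hi, hfk⟩
    exact ⟨m, hm, hca, i, (mem_range_iff c i).mp hi, hfk⟩
  · rintro ⟨m, hm, hca, i, hi, hfk⟩
    exact ⟨m, hm, hca, i, (mem_range_iff c i).mpr hi, hfk⟩

lemma count_nonneg (l : List Int) (k : Int) : (0 : Int) ≤ (l.count k : Int) :=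
  Int.natCast_nonneg _

lemma count_pos_of_mem {l : List Int} {k : Int} (h : 0 < (l.count k : Int)) : k ∈ l :=
  List.count_pos_iff.mp (by exact_mod_cast h)

-- counts of the concrete five-of-a-kind patterns (c ≠ 2)
lemma ca_pattern (hand : List Int) (c : Int) (hc : c ≠ 2) (m : List Int) (a b : Int)
    (hmem : ∀ k, k ∈ m ↔ (k = c ∨ k = 2))
    (hcc : (m.count c : Int) = a) (hc2 : (m.count 2 : Int) = b) :
    contains_all hand m = true ↔ a ≤ (hand.count c : Int) ∧ b ≤ (hand.count 2 : Int) := by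
  rw [contains_all_iff]
  constructor
  · intro h
    exact ⟨hcc ▸ h c ((hmem c).mpr (Or.inl rfl)), hc2 ▸ h 2 ((hmem 2).mpr (Or.inr rfl))⟩
  · rintro ⟨h1, h2⟩ k hk
    rcases (hmem k).mp hk with rfl | rfl
    · exact hcc ▸ h1
    · exact hc2 ▸ h2

-- the c ≠ 2 case of the equivalence
lemma main_ne2 (hand : List Int) (c : Int) (hc : ¬ c = 2) (h9 : ¬ hand.length < 9) :
    fullesthouse hand c = fullesthouse_alt hand c := by
  have hw0 : (0 : Int) ≤ (hand.count 2 : Int) := count_nonneg _ _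
  have hnc0 : (0 : Int) ≤ (hand.count c : Int) := count_nonneg _ _
  rw [Bool.eq_iff_iff, A_char hand c h9]
  unfold fullesthouse_alt
  rw [if_neg h9]
  simp only [PySem.Dict.getD_counter, if_neg hc]
  set w : Int := (hand.count 2 : Int)
  set nc : Int := (hand.count c : Int)
  -- characterize the five-of-a-kind branch and the remainder hand
  have hca : ∀ (m : List Int) (a b : Int), (∀ k, k ∈ m ↔ (k = c ∨ k = 2)) →
      (m.count c : Int) = a → (m.count 2 : Int) = b →
      (contains_all hand m = true ↔ a ≤ nc ∧ b ≤ w) :=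
    fun m a b h1 h2 h3 => ca_pattern hand c hc m a b h1 h2 h3
  have hrem : ∀ (m : List Int) (i : Int), i ∉ m →
      (remove_match hand m).getD i 0 = (hand.count i : Int) := by
    intro m i h0
    rw [getD_remove_match, List.count_eq_zero_of_not_mem h0, Nat.cast_zero, sub_zero]
  by_cases hfeas : nc = 0 ∨ w = 0 ∨ nc + w < 5
  · rw [if_pos hfeas]
    simp only [Bool.false_eq_true, iff_false]
    rintro ⟨m, hm, hcam, i, hiRng, hfk⟩
    -- every pattern needs 1 ≤ nc, 1 ≤ w and 5 ≤ nc + w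
    simp only [List.mem_cons, List.not_mem_nil, or_false] at hm
    rcases hm with rfl | rfl | rfl | rfl
    · rcases (hca _ 4 1 (by intro k; simp <;> tauto)
        (by simp [List.count_cons, hc, Ne.symm hc] <;> omega) (by simp [List.count_cons, hc, Ne.symm hc] <;> omega)).mp hcam
        with ⟨h1, h2⟩
      omega
    · rcases (hca _ 3 2 (by intro k; simp <;> tauto)
        (by simp [List.count_cons, hc, Ne.symm hc] <;> omega) (by simp [List.count_cons, hc, Ne.symm hc] <;> omega)).mp hcam
        with ⟨h1, h2⟩
      omega
    · rcases (hca _ 2 3 (by intro k; simp <;> tauto)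
        (by simp [List.count_cons, hc, Ne.symm hc] <;> omega) (by simp [List.count_cons, hc, Ne.symm hc] <;> omega)).mp hcam
        with ⟨h1, h2⟩
      omega
    · rcases (hca _ 1 4 (by intro k; simp <;> tauto)
        (by simp [List.count_cons, hc, Ne.symm hc] <;> omega) (by simp [List.count_cons, hc, Ne.symm hc] <;> omega)).mp hcam
        with ⟨h1, h2⟩
      omega
  · rw [if_neg hfeas, rankOk_iff]
    set rem : Int := w - max 1 (5 - nc) with hremdef
    constructor
    · -- A → B
      rintro ⟨m, hm, hcam, i, hiRng, hfk⟩
      have hic : i ≠ c := by rcases hiRng with ⟨_, h⟩ | ⟨h, _⟩ <;> omega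
      simp only [List.mem_cons, List.not_mem_nil, or_false] at hm
      have key : ∀ (a b : Int), 1 ≤ b → a + b = 5 →
          (contains_all hand m = true) →
          ((∀ k, k ∈ m ↔ (k = c ∨ k = 2)) ∧ (m.count c : Int) = a ∧ (m.count 2 : Int) = b) →
          (4 ≤ rem ∨ ∃ k ∈ hand, k ≠ 2 ∧ ((2 ≤ k ∧ k < c) ∨ (c < k ∧ k ≤ 14)) ∧
            4 ≤ (hand.count k : Int) + rem) := by
        rintro a b hb hab hcam' ⟨hmm, hma, hmb⟩
        rcases (hca m a b hmm hma hmb).mp hcam' with ⟨h1, h2⟩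
        have hWr : (remove_match hand m).getD 2 0 = w - b := by
          rw [getD_remove_match, hmb]
        have hrb : w - b ≤ rem := by omega
        by_cases hi2 : i = 2
        · subst hi2
          rw [fourok2_iff, hWr] at hfk
          exact Or.inl (by omega)
        · have hnotm : i ∉ m := by
            intro hk
            rcases (hmm i).mp hk with h | h
            · exact hic h
            · exact hi2 h
          rw [fourok_iff _ _ hi2, hWr, hrem m i hnotm] at hfk
          have hNi : (0 : Int) ≤ (hand.count i : Int) := count_nonneg _ _
          by_cases hpos : 0 < (hand.count i : Int)
          · exact Or.inr ⟨i, count_pos_of_mem hpos, hi2, hiRng, by omega⟩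
          · exact Or.inl (by omega)
      rcases hm with rfl | rfl | rfl | rfl
      · exact key 4 1 (by norm_num) (by norm_num) hcam
          ⟨by intro k; simp <;> tauto,
           by simp [List.count_cons, hc, Ne.symm hc] <;> omega, by simp [List.count_cons, hc, Ne.symm hc] <;> omega⟩
      · exact key 3 2 (by norm_num) (by norm_num) hcam
          ⟨by intro k; simp <;> tauto,
           by simp [List.count_cons, hc, Ne.symm hc] <;> omega, by simp [List.count_cons, hc, Ne.symm hc] <;> omega⟩
      · exact key 2 3 (by norm_num) (by norm_num) hcam
          ⟨by intro k; simp <;> tauto,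
           by simp [List.count_cons, hc, Ne.symm hc] <;> omega, by simp [List.count_cons, hc, Ne.symm hc] <;> omega⟩
      · exact key 1 4 (by norm_num) (by norm_num) hcam
          ⟨by intro k; simp <;> tauto,
           by simp [List.count_cons, hc, Ne.symm hc] <;> omega, by simp [List.count_cons, hc, Ne.symm hc] <;> omega⟩
    · -- B → A
      intro hB
      -- pick the pattern using as few wilds as possible
      have hpick : ∃ m ∈ ([[c,c,c,c,2],[c,c,c,2,2],[c,c,2,2,2],[c,2,2,2,2]] : List (List Int)),
          contains_all hand m = true ∧ (m.count 2 : Int) = max 1 (5 - nc) ∧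
          (∀ k, k ∈ m ↔ (k = c ∨ k = 2)) := by
        clear hB
        rcases (by omega : 4 ≤ nc ∨ nc = 3 ∨ nc = 2 ∨ nc = 1) with h | h | h | h
        · refine ⟨([c,c,c,c,2] : List Int), by simp, ?_, ?_, by intro k; simp <;> tauto⟩
          · exact (hca [c,c,c,c,2] 4 1 (by intro k; simp <;> tauto)
              (by simp [List.count_cons, hc, Ne.symm hc] <;> omega)
              (by simp [List.count_cons, hc, Ne.symm hc] <;> omega)).mpr ⟨by omega, by omega⟩
          · simp [List.count_cons, hc, Ne.symm hc] <;> omega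
        · refine ⟨([c,c,c,2,2] : List Int), by simp, ?_, ?_, by intro k; simp <;> tauto⟩
          · exact (hca [c,c,c,2,2] 3 2 (by intro k; simp <;> tauto)
              (by simp [List.count_cons, hc, Ne.symm hc] <;> omega)
              (by simp [List.count_cons, hc, Ne.symm hc] <;> omega)).mpr ⟨by omega, by omega⟩
          · simp [List.count_cons, hc, Ne.symm hc] <;> omega
        · refine ⟨([c,c,2,2,2] : List Int), by simp, ?_, ?_, by intro k; simp <;> tauto⟩
          · exact (hca [c,c,2,2,2] 2 3 (by intro k; simp <;> tauto)
              (by simp [List.count_cons, hc, Ne.symm hc] <;> omega)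
              (by simp [List.count_cons, hc, Ne.symm hc] <;> omega)).mpr ⟨by omega, by omega⟩
          · simp [List.count_cons, hc, Ne.symm hc] <;> omega
        · refine ⟨([c,2,2,2,2] : List Int), by simp, ?_, ?_, by intro k; simp <;> tauto⟩
          · exact (hca [c,2,2,2,2] 1 4 (by intro k; simp <;> tauto)
              (by simp [List.count_cons, hc, Ne.symm hc] <;> omega)
              (by simp [List.count_cons, hc, Ne.symm hc] <;> omega)).mpr ⟨by omega, by omega⟩
          · simp [List.count_cons, hc, Ne.symm hc] <;> omega
      rcases hpick with ⟨m, hmmem, hcam, hmb, hmm⟩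
      refine ⟨m, hmmem, hcam, ?_⟩
      have hWr : (remove_match hand m).getD 2 0 = rem := by
        rw [getD_remove_match, hmb]
      rcases hB with h4 | ⟨k, hkmem, hk2, hkRng, hk4⟩
      · by_cases hc3 : 3 ≤ c
        · refine ⟨2, Or.inl ⟨le_refl _, by omega⟩, ?_⟩
          rw [fourok2_iff, hWr]; omega
        · refine ⟨3, Or.inr ⟨by omega, by norm_num⟩, ?_⟩
          have hnotm : (3 : Int) ∉ m := by
            intro hk
            rcases (hmm 3).mp hk with h | h <;> omega
          rw [fourok_iff _ _ (by norm_num), hWr, hrem m 3 hnotm]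
          have : (0 : Int) ≤ (hand.count 3 : Int) := count_nonneg _ _
          omega
      · have hkc : k ≠ c := by rcases hkRng with ⟨_, h⟩ | ⟨h, _⟩ <;> omega
        refine ⟨k, hkRng, ?_⟩
        have hnotm : k ∉ m := by
          intro hk
          rcases (hmm k).mp hk with h | h
          · exact hkc h
          · exact hk2 h
        rw [fourok_iff _ _ hk2, hWr, hrem m k hnotm]
        have : (0 : Int) ≤ (hand.count k : Int) := count_nonneg _ _
        have hrem0 : 0 ≤ rem := by omega
        omega

-- the c = 2 case of the equivalence
lemma main_eq2 (hand : List Int) (h9 : ¬ hand.length < 9) :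
    fullesthouse hand 2 = fullesthouse_alt hand 2 := by
  have hw0 : (0 : Int) ≤ (hand.count 2 : Int) := count_nonneg _ _
  rw [Bool.eq_iff_iff, A_char hand 2 h9]
  unfold fullesthouse_alt
  rw [if_neg h9]
  simp only [PySem.Dict.getD_counter, eq_self_iff_true, if_true]
  set w : Int := (hand.count 2 : Int)
  have hca5 : contains_all hand [2,2,2,2,2] = true ↔ 5 ≤ w := by
    rw [contains_all_iff]
    constructor
    · intro h
      have h2 := h 2 (by simp)
      simp [List.count_cons] at h2
      omega
    · intro h k hk
      simp only [List.mem_cons, List.not_mem_nil, or_false] at hk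
      rcases hk with rfl | rfl | rfl | rfl | rfl <;> (simp [List.count_cons] <;> omega)
  have hrem : ∀ (i : Int), i ≠ 2 →
      (remove_match hand [2,2,2,2,2]).getD i 0 = (hand.count i : Int) := by
    intro i hi
    have hnm : i ∉ ([2,2,2,2,2] : List Int) := by
      intro hk
      simp only [List.mem_cons, List.not_mem_nil, or_false] at hk
      rcases hk with rfl | rfl | rfl | rfl | rfl <;> exact hi rfl
    rw [getD_remove_match, List.count_eq_zero_of_not_mem hnm, Nat.cast_zero, sub_zero]
  have hWr : (remove_match hand [2,2,2,2,2]).getD 2 0 = w - 5 := by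
    rw [getD_remove_match]
    have h5 : (([2,2,2,2,2] : List Int).count 2 : Int) = 5 := by simp
    rw [h5]
  by_cases hw5 : w < 5
  · rw [if_pos hw5]
    simp only [Bool.false_eq_true, iff_false]
    rintro ⟨m, hm, hcam, _, _, _⟩
    simp only [List.mem_cons, List.not_mem_nil, or_false] at hm
    rcases hm with rfl | rfl | rfl | rfl <;> exact absurd (hca5.mp hcam) (by omega)
  · rw [if_neg hw5, rankOk_iff]
    constructor
    · rintro ⟨m, hm, hcam, i, hiRng, hfk⟩
      have hi2 : i ≠ 2 := by rcases hiRng with ⟨_, h⟩ | ⟨h, _⟩ <;> omega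
      simp only [List.mem_cons, List.not_mem_nil, or_false] at hm
      have hm5 : m = [2,2,2,2,2] := by rcases hm with rfl | rfl | rfl | rfl <;> rfl
      subst hm5
      rw [fourok_iff _ _ hi2, hWr, hrem i hi2] at hfk
      have hNi : (0 : Int) ≤ (hand.count i : Int) := count_nonneg _ _
      by_cases hpos : 0 < (hand.count i : Int)
      · exact Or.inr ⟨i, count_pos_of_mem hpos, hi2, hiRng, by omega⟩
      · exact Or.inl (by omega)
    · intro hB
      refine ⟨[2,2,2,2,2], by simp, hca5.mpr (by omega), ?_⟩
      rcases hB with h4 | ⟨k, hkmem, hk2, hkRng, hk4⟩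
      · refine ⟨3, Or.inr ⟨by norm_num, by norm_num⟩, ?_⟩
        rw [fourok_iff _ _ (by norm_num), hWr, hrem 3 (by norm_num)]
        have : (0 : Int) ≤ (hand.count 3 : Int) := count_nonneg _ _
        omega
      · refine ⟨k, hkRng, ?_⟩
        rw [fourok_iff _ _ hk2, hWr, hrem k hk2]
        have : (0 : Int) ≤ (hand.count k : Int) := count_nonneg _ _
        omega

-- ===== VERDICT (by name: the statement is the Claim_ definition above) =====
theorem fullesthouse_spec : Claim_equal_fullesthouse := by
  intro hand c _
  unfold Spec_fullesthouse
  by_cases h9 : hand.length < 9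
  · unfold fullesthouse fullesthouse_alt
    rw [if_pos h9, if_pos h9]
  · by_cases hc : c = 2
    · subst hc; exact main_eq2 hand h9
    · exact main_ne2 hand c hc h9
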